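-- pv_equiv track=rewrite | github.com/TechsNtheCity940/OliTunes | backend/tab_data_pipeline.py | _extract_genre_from_metadata
-- ===== SOURCE A (Python) =====
-- def _extract_genre_from_metadata(artist: str) -> str:
--     """
--     Attempt to extract genre information from artist name.
--
--     Args:
--         artist: Artist name
--
--     Returns:
--         Estimated genre
--     """
--     # This is a simplistic approach - could be improved with a lookup table
--     artist = artist.lower()
--
--     if any(metal_band in artist for metal_band in ['metallica', 'killswitch', 'all that remains']):
--         return "metal"
--     elif any(rock_band in artist for rock_band in ['paramore', 'incubus']):
--         return "rock"
--     elif any(country_artist in artist for country_artist in ['johnny cash', 'morgan wallen']):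
--         return "country"
--     elif any(pop_artist in artist for pop_artist in ['ed sheeran']):
--         return "pop"
--     elif any(blues_artist in artist for blues_artist in ['john mayer']):
--         return "blues"
--
--     return "rock"  # Default genre
-- ===== SOURCE B (Python) =====
-- KEYWORD_GENRE = {
--     "metallica": "metal",
--     "killswitch": "metal",
--     "all that remains": "metal",
--     "paramore": "rock",
--     "incubus": "rock",
--     "johnny cash": "country",
--     "morgan wallen": "country",
--     "ed sheeran": "pop",
--     "john mayer": "blues",
-- }
--
-- PRIORITY = ["metal", "rock", "country", "pop", "blues"]
--
--
-- def _extract_genre_from_metadata(artist: str) -> str: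
--     name = artist.lower()
--     # Stage 1: collect ALL genres with a matching keyword (no early exit).
--     hits = {genre for keyword, genre in KEYWORD_GENRE.items() if keyword in name}
--     # Stage 2: resolve by priority ranking, defaulting to "rock".
--     return next((g for g in PRIORITY if g in hits), "rock")
-- ===== Notes on version B (the rewrite author's own statement) =====
-- stated objective: alternative
-- what changed: B decouples matching from decision: it first collects the full set of matching genres via a flat keyword-to-genre map (no short-circuit), then resolves the winner in a separate priority-ranking pass with the same default genre, instead of A's single short-circuiting if/elif chain.
import Mathlib
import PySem

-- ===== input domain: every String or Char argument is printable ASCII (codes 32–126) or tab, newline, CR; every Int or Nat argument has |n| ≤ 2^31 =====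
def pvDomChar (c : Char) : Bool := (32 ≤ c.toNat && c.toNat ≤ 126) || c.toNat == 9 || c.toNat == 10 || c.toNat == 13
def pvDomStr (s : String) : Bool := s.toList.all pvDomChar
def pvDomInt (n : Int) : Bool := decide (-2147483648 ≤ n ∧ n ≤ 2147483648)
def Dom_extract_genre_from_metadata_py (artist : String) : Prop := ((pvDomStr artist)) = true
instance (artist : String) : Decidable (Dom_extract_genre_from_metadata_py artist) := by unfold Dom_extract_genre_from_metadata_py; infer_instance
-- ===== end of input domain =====

-- ===== PORT A =====
-- One honest line: B decouples matching from decision — collect-all-matching-genres set, then a priority-ranking pass (alternative decomposition, same cost).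
def extract_genre_from_metadata_py (artist : String) : String :=
  let a := PySem.Str.lower artist
  if ["metallica", "killswitch", "all that remains"].any (fun b => PySem.Str.isIn b a) then "metal"
  else if ["paramore", "incubus"].any (fun b => PySem.Str.isIn b a) then "rock"
  else if ["johnny cash", "morgan wallen"].any (fun b => PySem.Str.isIn b a) then "country"
  else if ["ed sheeran"].any (fun b => PySem.Str.isIn b a) then "pop"
  else if ["john mayer"].any (fun b => PySem.Str.isIn b a) then "blues"
  else "rock"

-- ===== PORT B =====
def keywordGenre : List (String × String) :=
  [("metallica", "metal"), ("killswitch", "metal"), ("all that remains", "metal"),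
   ("paramore", "rock"), ("incubus", "rock"),
   ("johnny cash", "country"), ("morgan wallen", "country"),
   ("ed sheeran", "pop"), ("john mayer", "blues")]

def genrePriority : List String := ["metal", "rock", "country", "pop", "blues"]

def extract_genre_from_metadata_py_alt (artist : String) : String :=
  let name := PySem.Str.lower artist
  -- Stage 1: the set comprehension {g for k,g in … if k in name}
  let hits : PySem.Set String :=
    PySem.Set.ofList ((keywordGenre.filter (fun kg => PySem.Str.isIn kg.1 name)).map Prod.snd)
  -- Stage 2: next((g for g in PRIORITY if g in hits), "rock")
  match genrePriority.find? (fun g => PySem.Set.contains hits g) with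
  | some g => g
  | none => "rock"

-- ===== PRECONDITION & SPEC =====
def Spec_extract_genre_from_metadata_py (artist : String) (out : String) : Prop := out = extract_genre_from_metadata_py_alt artist
instance (artist : String) (out : String) : Decidable (Spec_extract_genre_from_metadata_py artist out) := by unfold Spec_extract_genre_from_metadata_py; infer_instance

-- ===== CLAIM =====
def Claim_equal_extract_genre_from_metadata_py : Prop := ∀ (artist : String), Dom_extract_genre_from_metadata_py artist → Spec_extract_genre_from_metadata_py artist (extract_genre_from_metadata_py artist)

-- ===== LEMMAS AND PROOFS =====
-- Both sides depend only on which keyword-group matched; characterize hits-membership per genre, then split on the five group booleans.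
def pvHits (p : String → Bool) : PySem.Set String :=
  PySem.Set.ofList ((keywordGenre.filter (fun kg => p kg.1)).map Prod.snd)

theorem pvContains_metal (p : String → Bool) :
    PySem.Set.contains (pvHits p) "metal" = (p "metallica" || p "killswitch" || p "all that remains") := by
  rw [Bool.eq_iff_iff]
  simp [pvHits, PySem.Set.contains, keywordGenre, List.mem_filter, PySem.Set.mem_ofList]
  tauto

theorem pvContains_rock (p : String → Bool) :
    PySem.Set.contains (pvHits p) "rock" = (p "paramore" || p "incubus") := by
  rw [Bool.eq_iff_iff]
  simp [pvHits, PySem.Set.contains, keywordGenre, List.mem_filter, PySem.Set.mem_ofList]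

theorem pvContains_country (p : String → Bool) :
    PySem.Set.contains (pvHits p) "country" = (p "johnny cash" || p "morgan wallen") := by
  rw [Bool.eq_iff_iff]
  simp [pvHits, PySem.Set.contains, keywordGenre, List.mem_filter, PySem.Set.mem_ofList]

theorem pvContains_pop (p : String → Bool) :
    PySem.Set.contains (pvHits p) "pop" = p "ed sheeran" := by
  rw [Bool.eq_iff_iff]
  simp [pvHits, PySem.Set.contains, keywordGenre, List.mem_filter, PySem.Set.mem_ofList]

theorem pvContains_blues (p : String → Bool) :
    PySem.Set.contains (pvHits p) "blues" = p "john mayer" := by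
  rw [Bool.eq_iff_iff]
  simp [pvHits, PySem.Set.contains, keywordGenre, List.mem_filter, PySem.Set.mem_ofList]

theorem pvMain (p : String → Bool) :
    (if ["metallica", "killswitch", "all that remains"].any p then "metal"
     else if ["paramore", "incubus"].any p then "rock"
     else if ["johnny cash", "morgan wallen"].any p then "country"
     else if ["ed sheeran"].any p then "pop"
     else if ["john mayer"].any p then "blues"
     else "rock")
    = (match genrePriority.find? (fun g => PySem.Set.contains (pvHits p) g) with
       | some g => g
       | none => "rock") := by
  simp only [genrePriority, List.find?, pvContains_metal, pvContains_rock,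
    pvContains_country, pvContains_pop, pvContains_blues,
    List.any_cons, List.any_nil, Bool.or_false]
  by_cases h1 : p "metallica" = true <;> by_cases h2 : p "killswitch" = true <;>
  by_cases h3 : p "all that remains" = true <;> by_cases h4 : p "paramore" = true <;>
  by_cases h5 : p "incubus" = true <;> by_cases h6 : p "johnny cash" = true <;>
  by_cases h7 : p "morgan wallen" = true <;> by_cases h8 : p "ed sheeran" = true <;>
  by_cases h9 : p "john mayer" = true <;>
  simp [h1, h2, h3, h4, h5, h6, h7, h8, h9]

-- ===== VERDICT =====
theorem extract_genre_from_metadata_py_spec : Claim_equal_extract_genre_from_metadata_py := by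
  intro artist _
  unfold Spec_extract_genre_from_metadata_py extract_genre_from_metadata_py
    extract_genre_from_metadata_py_alt
  exact pvMain (fun s => PySem.Str.isIn s (PySem.Str.lower artist))
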